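-- pv_equiv track=rewrite | github.com/durgaharish1993/EM | em2.py | ReadEpronJpron_arguments
-- ===== SOURCE A (Python) =====
-- def ReadEpronJpron_arguments(lines):
--     wordPairs = []
--
--     for i, line in enumerate(lines):
--         if i % 3 == 0:
--             eword = line.strip('\n')
--         elif i % 3 == 1:
--             jword = line.strip('\n')
--             wordPairs.append((eword, jword))
--
--     return wordPairs
-- ===== SOURCE B (Python) =====
-- def ReadEpronJpron_arguments(lines):
--     _MISSING = object()
--     wordPairs = []
--     it = iter(lines)
--     for eword in it:
--         jword = next(it, _MISSING)
--         if jword is _MISSING: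
--             break
--         wordPairs.append((eword.strip('\n'), jword.strip('\n')))
--         next(it, _MISSING)
--     return wordPairs
-- ===== Notes on version B (the rewrite author's own statement) =====
-- stated objective: simpler
-- what changed: B consumes the input three lines at a time with an explicit iterator (pair the first two, discard the third) instead of enumerating every line and testing i % 3 with a carried eword variable.
import Mathlib
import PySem

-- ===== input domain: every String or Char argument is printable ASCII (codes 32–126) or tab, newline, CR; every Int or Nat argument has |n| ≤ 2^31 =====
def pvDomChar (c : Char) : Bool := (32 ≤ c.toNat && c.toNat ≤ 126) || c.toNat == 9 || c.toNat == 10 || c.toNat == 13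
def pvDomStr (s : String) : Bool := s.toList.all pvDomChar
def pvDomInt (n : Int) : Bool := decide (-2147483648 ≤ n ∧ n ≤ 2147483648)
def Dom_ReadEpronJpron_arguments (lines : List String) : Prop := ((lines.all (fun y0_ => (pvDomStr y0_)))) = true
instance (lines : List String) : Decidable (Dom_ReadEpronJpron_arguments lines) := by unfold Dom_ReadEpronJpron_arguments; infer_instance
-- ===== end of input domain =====

-- B consumes the input three lines at a time (pair the first two, skip the third) instead of
-- enumerating every line and testing i % 3; return values are proved equal on all inputs.

-- ===== PORT A =====
-- the enumerate loop of A: i is the running index, eword the carried variable, acc = wordPairs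
def pvGoA (i : Nat) (eword : String) (acc : List (String × String)) :
    List String → List (String × String)
  | [] => acc
  | l :: ls =>
    if i % 3 == 0 then pvGoA (i + 1) (PySem.Str.stripChars l "\n") acc ls
    else if i % 3 == 1 then pvGoA (i + 1) eword (acc ++ [(eword, PySem.Str.stripChars l "\n")]) ls
    else pvGoA (i + 1) eword acc ls

def ReadEpronJpron_arguments (lines : List String) : List (String × String) :=
  pvGoA 0 "" [] lines

-- ===== PORT B =====
def ReadEpronJpron_arguments_alt (lines : List String) : List (String × String) :=
  match lines with
  | e :: j :: rest =>
      (PySem.Str.stripChars e "\n", PySem.Str.stripChars j "\n") ::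
        ReadEpronJpron_arguments_alt rest.tail
  | _ => []
termination_by lines.length
decreasing_by simp [List.length_tail]; omega

-- ===== PRECONDITION & SPEC =====
def Spec_ReadEpronJpron_arguments (lines : List String) (out : List (String × String)) : Prop := out = ReadEpronJpron_arguments_alt lines
instance (lines : List String) (out : List (String × String)) : Decidable (Spec_ReadEpronJpron_arguments lines out) := by unfold Spec_ReadEpronJpron_arguments; infer_instance

-- ===== CLAIM (what is proved, stated in full; the proofs are below) =====
def Claim_equal_ReadEpronJpron_arguments : Prop := ∀ (lines : List String), Dom_ReadEpronJpron_arguments lines → Spec_ReadEpronJpron_arguments lines (ReadEpronJpron_arguments lines)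

-- ===== LEMMAS AND PROOFS =====
theorem pvGoA_eq_alt : ∀ (ls : List String) (i : Nat) (e : String)
    (acc : List (String × String)), i % 3 = 0 →
    pvGoA i e acc ls = acc ++ ReadEpronJpron_arguments_alt ls := by
  intro ls
  induction ls using ReadEpronJpron_arguments_alt.induct with
  | case1 e j rest ih =>
    intro i ew acc hi
    have h1 : (i + 1) % 3 = 1 := by omega
    have h2 : (i + 2) % 3 = 2 := by omega
    rw [pvGoA, if_pos (by simp [hi]), pvGoA, if_neg (by simp [h1]), if_pos (by simp [h1])]
    match rest with
    | [] =>
      simp [pvGoA, ReadEpronJpron_arguments_alt]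
    | t :: rest' =>
      rw [pvGoA, if_neg (by simp [h2]), if_neg (by simp [h2])]
      have hh := ih (i + 3) (PySem.Str.stripChars e "\n")
        (acc ++ [(PySem.Str.stripChars e "\n", PySem.Str.stripChars j "\n")]) (by omega)
      simp only [List.tail_cons] at hh
      rw [show i + 1 + 1 + 1 = i + 3 from rfl, hh]
      simp [ReadEpronJpron_arguments_alt]
  | case2 ls h =>
    intro i ew acc hi
    cases ls with
    | nil => simp [pvGoA, ReadEpronJpron_arguments_alt]
    | cons e ls' =>
      cases ls' with
      | nil => simp [pvGoA, ReadEpronJpron_arguments_alt, hi]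
      | cons j rest => exact (h e j rest rfl).elim

-- ===== VERDICT (by name: the statement is the Claim_ definition above) =====
theorem ReadEpronJpron_arguments_spec : Claim_equal_ReadEpronJpron_arguments := by
  intro lines _
  unfold Spec_ReadEpronJpron_arguments ReadEpronJpron_arguments
  simpa using pvGoA_eq_alt lines 0 "" [] rfl
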